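-- pv_equiv track=rewrite | github.com/PythonAndGoCourses2/PythonHomework | parser.py | separate_function
-- ===== SOURCE A (Python) =====
-- def separate_function(raw_tokens):
--     """Selecting function arguments"""
--     tokens = ['']
--     stack = []  # To define a closing bracket or end of function
--     while raw_tokens:
--         token = raw_tokens[0]
--         raw_tokens = raw_tokens[1:]
--         if token == '(':
--             if tokens[-1].isalnum():  # Selection start of function
--                 tokens.append('[')
--                 stack.append('[')
--             else:
--                 tokens.append(token)
--                 stack.append(token)
--         elif token == ')':
--             x = stack.pop()
--             if x == '[':  # Define a closing bracket or end of function
--                 tokens.append(']')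
--             else:
--                 tokens.append(token)
--         else:
--             tokens.append(token)
--     return tokens[1:]
-- ===== SOURCE B (Python) =====
-- def separate_function(raw_tokens):
--     """Selecting function arguments"""
--     # Pass 1: map each ')' index to its matching '(' index (IndexError on unmatched ')').
--     opener = {}
--     stack = []
--     for i, token in enumerate(raw_tokens):
--         if token == '(':
--             stack.append(i)
--         elif token == ')':
--             opener[i] = stack.pop()
--
--     def is_call(j):
--         return j > 0 and raw_tokens[j - 1].isalnum()
--
--     # Pass 2: rewrite call parens to brackets.
--     out = []
--     for i, token in enumerate(raw_tokens):
--         if token == '(' and is_call(i):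
--             out.append('[')
--         elif token == ')' and is_call(opener[i]):
--             out.append(']')
--         else:
--             out.append(token)
--     return out
-- ===== Notes on version B (the rewrite author's own statement) =====
-- stated objective: faster
-- what changed: Replaces A's single destructive pass (which re-slices raw_tokens[1:] each iteration and decides each ')' from a stack of marker strings, testing the previous OUTPUT token) with two non-destructive passes: pass 1 builds a dict matching each ')' index to its '(' index via an index stack, pass 2 maps every token to its rewrite by checking whether the raw token preceding the (matching) '(' is alphanumeric.
import Mathlib
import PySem

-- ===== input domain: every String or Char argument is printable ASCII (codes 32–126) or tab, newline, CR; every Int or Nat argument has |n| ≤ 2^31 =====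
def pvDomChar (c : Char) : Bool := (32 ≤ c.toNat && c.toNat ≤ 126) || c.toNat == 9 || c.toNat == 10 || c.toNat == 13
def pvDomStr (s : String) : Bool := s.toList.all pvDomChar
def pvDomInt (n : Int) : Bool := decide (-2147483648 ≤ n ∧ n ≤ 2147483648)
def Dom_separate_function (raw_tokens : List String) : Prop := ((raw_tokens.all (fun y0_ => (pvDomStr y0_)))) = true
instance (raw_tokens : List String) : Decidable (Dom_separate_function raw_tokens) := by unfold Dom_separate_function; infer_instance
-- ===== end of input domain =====

-- B replaces A's destructive single pass (quadratic because of raw_tokens[1:] re-slicing) by two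
-- linear passes: an index-stack pass matching each ')' to its '(' and a rewrite pass; return-value
-- equivalence is proved on inputs where A does not raise (Pre_).

-- ===== PORT A =====
-- A's loop; `tokens` is kept newest-first (head = Python tokens[-1], the initial '' is last),
-- `stack` newest-first (head = top, Python append/pop at the end).
def sepA_loop (l : List String) (tokens : List String) (stack : List String) : List String :=
  match l with
  | [] => tokens
  | token :: rest =>
    if token = "(" then
      if PySem.Str.strIsalnum (tokens.headD "") then
        sepA_loop rest ("[" :: tokens) ("[" :: stack)
      else
        sepA_loop rest (token :: tokens) (token :: stack)
    else if token = ")" then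
      match stack with
      | [] => tokens                    -- stack.pop() on empty list: IndexError, excluded by Pre_
      | x :: s => sepA_loop rest ((if x = "[" then "]" else token) :: tokens) s
    else
      sepA_loop rest (token :: tokens) stack

-- return tokens[1:]: drop the initial '' (last of the newest-first accumulator) and restore order
def separate_function (raw_tokens : List String) : List String :=
  ((sepA_loop raw_tokens [""] []).dropLast).reverse

-- ===== PORT B =====
-- pass-1 step: '(' pushes its index, ')' pops its opener and records opener[i] = j
-- (stack newest-first; pop on empty = IndexError, excluded by Pre_ — state left unchanged there)
def sepB_step (st : PySem.Dict Int Int × List Int) (p : Int × String) :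
    PySem.Dict Int Int × List Int :=
  if p.2 = "(" then (st.1, p.1 :: st.2)
  else if p.2 = ")" then
    match st.2 with
    | [] => st
    | j :: s => (st.1.insert p.1 j, s)
  else st

def sepB_pass1 (raw_tokens : List String) : PySem.Dict Int Int × List Int :=
  (PySem.List.enumerate raw_tokens 0).foldl sepB_step (PySem.Dict.empty, [])

-- is_call(j): j > 0 and raw_tokens[j-1].isalnum()
def sepB_isCall (raw_tokens : List String) (j : Int) : Bool :=
  decide (0 < j) && PySem.Str.strIsalnum (PySem.List.pyGetD raw_tokens (j - 1) "")

-- pass-2 body for one enumerated token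
def sepB_out (raw_tokens : List String) (opener : PySem.Dict Int Int) (p : Int × String) : String :=
  if p.2 = "(" then (if sepB_isCall raw_tokens p.1 then "[" else p.2)
  else if p.2 = ")" then (if sepB_isCall raw_tokens (opener.getD p.1 0) then "]" else p.2)
  else p.2

def separate_function_alt (raw_tokens : List String) : List String :=
  (PySem.List.enumerate raw_tokens 0).map
    (sepB_out raw_tokens (sepB_pass1 raw_tokens).1)

-- ===== PRECONDITION & SPEC =====
-- A raises IndexError (stack.pop() on an empty stack) exactly when some prefix holds more ')'
-- than '('; Pre_ excludes exactly those inputs (B raises there too).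
def Pre_separate_function (raw_tokens : List String) : Prop :=
  ∀ m ≤ raw_tokens.length,
    ((raw_tokens.take m).count ")") ≤ (raw_tokens.take m).count "("
instance (raw_tokens : List String) : Decidable (Pre_separate_function raw_tokens) := by
  unfold Pre_separate_function; infer_instance

def pvWitness_separate_function : List String := ["f", "(", "x", "+", "1", ")", "*", "(", "y", ")"]

def Spec_separate_function (raw_tokens : List String) (out : List String) : Prop :=
  out = separate_function_alt raw_tokens
instance (raw_tokens : List String) (out : List String) : Decidable (Spec_separate_function raw_tokens out) := by
  unfold Spec_separate_function; infer_instance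

-- ===== CLAIM (what is proved, stated in full; the proofs are below) =====
def Claim_equal_separate_function : Prop :=
  ∀ (raw_tokens : List String), Dom_separate_function raw_tokens →
    Pre_separate_function raw_tokens →
    Spec_separate_function raw_tokens (separate_function raw_tokens)

-- ===== LEMMAS AND PROOFS =====

-- folding pass 1 over pairs whose indices are all > i does not change opener[i]
lemma sepB_getD_preserve (es : List (Int × String)) :
    ∀ (st : PySem.Dict Int Int × List Int) (i : Int), (∀ p ∈ es, i < p.1) →
      ((es.foldl sepB_step st).1).getD i 0 = st.1.getD i 0 := by
  induction es with
  | nil => intro st i _; rfl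
  | cons p es ih =>
    intro st i h
    have hp : i < p.1 := h p (by simp)
    have hrest : ∀ q ∈ es, i < q.1 := fun q hq => h q (by simp [hq])
    rw [List.foldl_cons, ih _ i hrest]
    unfold sepB_step
    split_ifs with h1 h2
    · rfl
    · cases st.2 with
      | nil => rfl
      | cons j s => exact PySem.Dict.getD_insert_of_ne _ _ _ (by omega)
    · rfl

-- the main loop invariant: A's loop on the suffix raw.drop k, with A's stack the marked image
-- of B's index stack and tokens[-1] alnum-equivalent to is_call(k), produces pass 2's outputs
lemma sepA_eq_main (raw : List String) :
    ∀ (l : List String) (k : Nat) (stB : List Int) (op : PySem.Dict Int Int)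
      (acc : List String),
      raw.drop k = l →
      (∀ m : Nat, ((l.take m).count ")") ≤ (l.take m).count "(" + stB.length) →
      PySem.Str.strIsalnum (acc.headD "") = sepB_isCall raw (k : Int) →
      sepA_loop l acc (stB.map (fun j => if sepB_isCall raw j then "[" else "(")) =
        ((PySem.List.enumerate l (k : Int)).map
            (sepB_out raw (((PySem.List.enumerate l (k : Int)).foldl sepB_step (op, stB)).1))).reverse
          ++ acc := by
  intro l
  induction l with
  | nil =>
    intro k stB op acc _ _ _
    simp [sepA_loop, PySem.List.enumerate_nil]
  | cons token rest ih =>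
    intro k stB op acc hdrop hbal hacc
    have hdrop' : raw.drop (k + 1) = rest := by
      rw [← List.drop_drop, hdrop]; rfl
    have h0 : raw[k]? = some token := by
      have h := (List.getElem?_drop (xs := raw) (i := k) (j := 0))
      rw [hdrop] at h
      simpa using h.symm
    have hcall_succ : ∀ out : String, PySem.Str.strIsalnum out = PySem.Str.strIsalnum token →
        PySem.Str.strIsalnum out = sepB_isCall raw ((k : Int) + 1) := by
      intro out hout
      unfold sepB_isCall
      have h1 : ((k : Int) + 1) - 1 = ((k : Nat) : Int) := by omega
      have hpos : (0 : Int) < (k : Int) + 1 := by omega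
      rw [h1]
      simp only [PySem.List.pyGetD_natCast, List.getD, h0, Option.getD_some,
        decide_eq_true hpos, Bool.true_and]
      exact hout
    rw [PySem.List.enumerate_cons]
    simp only [List.foldl_cons, List.map_cons, List.reverse_cons, List.append_assoc,
      List.singleton_append]
    by_cases htok : token = "("
    · -- '(' case
      subst htok
      have hstep : sepB_step (op, stB) ((k : Int), "(") = (op, (k : Int) :: stB) := by
        simp [sepB_step]
      rw [hstep]
      have hbal' : ∀ m : Nat, ((rest.take m).count ")") ≤ (rest.take m).count "(" + ((k : Int) :: stB).length := by
        intro m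
        have h2 := hbal (m + 1)
        rw [List.take_succ_cons, List.count_cons_of_ne (by decide), List.count_cons_self] at h2
        simp only [List.length_cons]
        omega
      have hout : sepB_out raw (((PySem.List.enumerate rest ((k : Int) + 1)).foldl sepB_step (op, (k : Int) :: stB)).1) ((k : Int), "(")
          = if sepB_isCall raw (k : Int) then "[" else "(" := by
        simp [sepB_out]
      rw [hout]
      unfold sepA_loop
      rw [if_pos rfl]
      by_cases hc : sepB_isCall raw (k : Int)
      · rw [if_pos (by rw [hacc]; exact hc), if_pos hc]
        have ihh := ih (k + 1) ((k : Int) :: stB) op ("[" :: acc) hdrop' hbal'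
          (hcall_succ "[" (by decide))
        push_cast at ihh
        simp only [List.map_cons] at ihh
        rw [if_pos hc] at ihh
        exact ihh
      · rw [if_neg (by rw [hacc]; exact hc), if_neg hc]
        have ihh := ih (k + 1) ((k : Int) :: stB) op ("(" :: acc) hdrop' hbal'
          (hcall_succ "(" (by decide))
        push_cast at ihh
        simp only [List.map_cons] at ihh
        rw [if_neg hc] at ihh
        exact ihh
    · by_cases htok2 : token = ")"
      · -- ')' case
        subst htok2
        have hne : stB ≠ [] := by
          have h1 := hbal 1
          simp at h1
          intro h; rw [h] at h1; simp at h1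
        obtain ⟨j, s, rfl⟩ : ∃ j s, stB = j :: s := by
          cases stB with
          | nil => exact absurd rfl hne
          | cons j s => exact ⟨j, s, rfl⟩
        have hstep : sepB_step (op, j :: s) ((k : Int), ")") = (op.insert (k : Int) j, s) := by
          simp [sepB_step]
        rw [hstep]
        have hbal' : ∀ m : Nat, ((rest.take m).count ")") ≤ (rest.take m).count "(" + s.length := by
          intro m
          have h2 := hbal (m + 1)
          rw [List.take_succ_cons, List.count_cons_self, List.count_cons_of_ne (by decide)] at h2
          simp only [List.length_cons] at h2
          omega
        have hgd : (((PySem.List.enumerate rest ((k : Int) + 1)).foldl sepB_step (op.insert (k : Int) j, s)).1).getD (k : Int) 0 = j := by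
          rw [sepB_getD_preserve _ _ _ ?_]
          · exact PySem.Dict.getD_insert_self _ _ _ _
          · intro p hp
            rcases (PySem.List.mem_enumerate_iff _ _ _).1 hp with ⟨k', _, rfl⟩
            simp
            omega
        have hout : sepB_out raw (((PySem.List.enumerate rest ((k : Int) + 1)).foldl sepB_step (op.insert (k : Int) j, s)).1) ((k : Int), ")")
            = if sepB_isCall raw j then "]" else ")" := by
          simp [sepB_out, hgd]
        rw [hout]
        unfold sepA_loop
        rw [if_neg (by decide), if_pos rfl]
        simp only [List.map_cons]
        by_cases hc : sepB_isCall raw j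
        · rw [if_pos hc, if_pos hc]
          have ihh := ih (k + 1) s (op.insert (k : Int) j) ("]" :: acc) hdrop' hbal'
            (hcall_succ "]" (by decide))
          push_cast at ihh
          rw [show (if ("[" : String) = "[" then ("]" : String) else ")") = "]" from if_pos rfl]
          exact ihh
        · rw [if_neg hc, if_neg hc]
          have ihh := ih (k + 1) s (op.insert (k : Int) j) (")" :: acc) hdrop' hbal'
            (hcall_succ ")" (by decide))
          push_cast at ihh
          rw [show (if ("(" : String) = "[" then ("]" : String) else ")") = ")" from if_neg (by decide)]
          exact ihh
      · -- other token
        have hstep : sepB_step (op, stB) ((k : Int), token) = (op, stB) := by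
          simp [sepB_step, htok, htok2]
        rw [hstep]
        have hbal' : ∀ m : Nat, ((rest.take m).count ")") ≤ (rest.take m).count "(" + stB.length := by
          intro m
          have h2 := hbal (m + 1)
          rw [List.take_succ_cons, List.count_cons_of_ne htok2, List.count_cons_of_ne htok] at h2
          omega
        have hout : sepB_out raw (((PySem.List.enumerate rest ((k : Int) + 1)).foldl sepB_step (op, stB)).1) ((k : Int), token) = token := by
          simp [sepB_out, htok, htok2]
        rw [hout]
        unfold sepA_loop
        rw [if_neg htok, if_neg htok2]
        have ihh := ih (k + 1) stB op (token :: acc) hdrop' hbal'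
          (hcall_succ token rfl)
        push_cast at ihh
        exact ihh

-- ===== VERDICT (by name: the statement is the Claim_ definition above) =====
theorem separate_function_spec : Claim_equal_separate_function := by
  intro raw _ hpre
  unfold Spec_separate_function separate_function separate_function_alt sepB_pass1
  have hbal : ∀ m : Nat, ((raw.take m).count ")") ≤ (raw.take m).count "(" + ([] : List Int).length := by
    intro m
    simp only [List.length_nil, Nat.add_zero]
    by_cases hm : m ≤ raw.length
    · exact hpre m hm
    · rw [List.take_of_length_le (by omega)]
      have h := hpre raw.length (le_refl _)
      rwa [List.take_length] at h
  have h := sepA_eq_main raw raw 0 [] PySem.Dict.empty [""] (by simp) hbal (by simp [sepB_isCall]; decide)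
  simp only [List.map_nil, Nat.cast_zero] at h
  rw [h]
  simp
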